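-- pv_equiv track=rewrite | github.com/danilo-p/eng-soft-ii-lab9 | main.py | get_files_and_authors
-- ===== SOURCE A (Python) =====
-- def get_files_and_authors(contributions):
--     files = []
--     authors = []
--     for author, file in contributions.keys():
--         if not (author in authors):
--             authors.append(author)
--
--         if not (file in files):
--             files.append(file)
--
--     return files, authors
-- ===== SOURCE B (Python) =====
-- def _ordered_unique(values):
--     # map each distinct value to its FIRST index: reversed pass, later (earlier-index)
--     # assignments overwrite, so the final value is the smallest index
--     first = {}
--     for i, v in reversed(list(enumerate(values))):
--         first[v] = i
--     # the distinct values sorted by first-appearance index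
--     return sorted(first, key=first.__getitem__)
--
-- def get_files_and_authors(contributions):
--     keys = list(contributions.keys())
--     files = _ordered_unique([f for _, f in keys])
--     authors = _ordered_unique([a for a, _ in keys])
--     return files, authors
-- ===== Notes on version B (the rewrite author's own statement) =====
-- stated objective: alternative
-- what changed: Replaces A's single interleaved membership-scan loop by, per output list, building a value-to-first-index dict in one reversed enumerated pass and then sorting the distinct values by that first index.
import Mathlib
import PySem

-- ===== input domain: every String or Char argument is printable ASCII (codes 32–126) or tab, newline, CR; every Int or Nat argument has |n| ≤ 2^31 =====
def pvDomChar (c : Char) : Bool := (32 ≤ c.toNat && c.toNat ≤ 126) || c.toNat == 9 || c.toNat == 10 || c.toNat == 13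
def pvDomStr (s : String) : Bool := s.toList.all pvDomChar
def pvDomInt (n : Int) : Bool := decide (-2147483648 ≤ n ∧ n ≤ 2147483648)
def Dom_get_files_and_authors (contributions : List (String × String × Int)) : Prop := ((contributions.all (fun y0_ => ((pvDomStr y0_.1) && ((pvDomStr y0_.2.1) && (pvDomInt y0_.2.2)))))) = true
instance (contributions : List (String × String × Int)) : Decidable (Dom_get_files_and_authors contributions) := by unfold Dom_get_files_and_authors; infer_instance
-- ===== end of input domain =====

-- B replaces A's interleaved membership-scan loop by, per list, a reversed enumerated pass
-- building a value-to-first-index dict and then sorting the distinct values by that index.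

-- ===== PORT A =====
-- A: one pass over the dict keys with two membership-tested append accumulators.
-- (Python list `in` is ==-membership: ported as List.contains)
def get_files_and_authors (contributions : List (String × String × Int)) : List String × List String :=
  contributions.foldl
    (fun (st : List String × List String) p =>
      (if st.1.contains p.2.1 then st.1 else st.1 ++ [p.2.1],
       if st.2.contains p.1 then st.2 else st.2 ++ [p.1]))
    ([], [])

-- ===== PORT B =====
-- B helper: the value-to-first-index dict (reversed pass over enumerate; earlier-index
-- inserts overwrite, so each value ends at its first index)
def pvFirst (values : List String) : PySem.Dict String Int :=
  (PySem.List.enumerate values 0).reverse.foldl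
    (fun (d : PySem.Dict String Int) p => d.insert p.2 p.1) PySem.Dict.empty

-- B helper: the distinct values sorted by first-appearance index
def pvOrderedUnique (values : List String) : List String :=
  PySem.List.sorted (pvFirst values).keys (fun k => (pvFirst values).getD k 0) false

def get_files_and_authors_alt (contributions : List (String × String × Int)) : List String × List String :=
  (pvOrderedUnique (contributions.map (fun p => p.2.1)),
   pvOrderedUnique (contributions.map (fun p => p.1)))

-- ===== PRECONDITION & SPEC =====
def Spec_get_files_and_authors (contributions : List (String × String × Int)) (out : List String × List String) : Prop := out = get_files_and_authors_alt contributions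
instance (contributions : List (String × String × Int)) (out : List String × List String) : Decidable (Spec_get_files_and_authors contributions out) := by unfold Spec_get_files_and_authors; infer_instance

-- ===== CLAIM =====
def Claim_equal_get_files_and_authors : Prop := ∀ (contributions : List (String × String × Int)), Dom_get_files_and_authors contributions → Spec_get_files_and_authors contributions (get_files_and_authors contributions)

-- ===== LEMMAS AND PROOFS =====

-- A's interleaved loop, both accumulators generalized, is two PySem.Set.add folds
theorem pv_main_loop (xs : List (String × String × Int)) : ∀ fl al : List String,
    xs.foldl (fun (st : List String × List String) p =>
      (if st.1.contains p.2.1 then st.1 else st.1 ++ [p.2.1],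
       if st.2.contains p.1 then st.2 else st.2 ++ [p.1])) (fl, al) =
    ((xs.map (fun p => p.2.1)).foldl PySem.Set.add fl,
     (xs.map (fun p => p.1)).foldl PySem.Set.add al) := by
  induction xs with
  | nil => intro fl al; rfl
  | cons x xs ih =>
    intro fl al
    simp only [List.foldl_cons, List.map_cons, ih]
    rfl

-- the reversed-enumerate insert loop looks up each value's FIRST index
theorem pv_first_get? (vs : List String) : ∀ (s : Int) (v : String),
    ((PySem.List.enumerate vs s).reverse.foldl
      (fun (d : PySem.Dict String Int) p => d.insert p.2 p.1) PySem.Dict.empty).get? v =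
    (PySem.List.index? vs v).map (fun k => s + (k : Int)) := by
  induction vs with
  | nil => intro s v; rfl
  | cons x xs ih =>
    intro s v
    rw [PySem.List.enumerate_cons, List.reverse_cons, List.foldl_append]
    simp only [List.foldl_cons, List.foldl_nil]
    by_cases h : x = v
    · subst h
      rw [PySem.List.index?_cons_self]
      simp [PySem.Dict.get?_insert_self]
    · rw [PySem.Dict.get?_insert_of_ne _ _ (Ne.symm h), PySem.List.index?_cons_of_ne xs h, ih]
      cases PySem.List.index? xs v
      · simp
      · simp
        omega

-- first-appearance index, as a Nat
def pvIdx (vs : List String) (v : String) : Nat := (PySem.List.index? vs v).getD 0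

theorem pv_idx_lt_length (vs : List String) (v : String) (hv : v ∈ vs) :
    pvIdx vs v < vs.length := by
  obtain ⟨k, hk⟩ := Option.isSome_iff_exists.mp (((PySem.List.index?_isSome_iff _ _).mpr hv))
  obtain ⟨hlt, -, -⟩ := PySem.List.getElem_of_index?_eq_some hk
  unfold pvIdx
  rw [hk]
  simpa using hlt

theorem pv_idx_append_of_mem (xs t : List String) (v : String) (hv : v ∈ xs) :
    pvIdx (xs ++ t) v = pvIdx xs v := by
  simp only [pvIdx]
  rw [PySem.List.index?_append_of_mem t hv]

-- the distinct values in first-appearance order have strictly increasing first indices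
theorem pv_pairwise (vs : List String) :
    (PySem.Set.ofList vs).Pairwise (fun a b => pvIdx vs a < pvIdx vs b) := by
  induction vs using List.reverseRecOn with
  | nil => simp [PySem.Set.ofList_nil]
  | append_singleton xs x ih =>
    rw [PySem.Set.ofList_append_singleton]
    by_cases hx : x ∈ PySem.Set.ofList xs
    · rw [PySem.Set.add_of_mem hx]
      refine ih.imp_of_mem ?_
      intro a b ha hb hab
      rw [pv_idx_append_of_mem xs [x] a ((PySem.Set.mem_ofList _ _).mp ha),
          pv_idx_append_of_mem xs [x] b ((PySem.Set.mem_ofList _ _).mp hb)]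
      exact hab
    · rw [PySem.Set.add_of_not_mem hx]
      rw [List.pairwise_append]
      refine ⟨?_, by simp, ?_⟩
      · refine ih.imp_of_mem ?_
        intro a b ha hb hab
        rw [pv_idx_append_of_mem xs [x] a ((PySem.Set.mem_ofList _ _).mp ha),
            pv_idx_append_of_mem xs [x] b ((PySem.Set.mem_ofList _ _).mp hb)]
        exact hab
      · intro a ha b hb
        rw [List.mem_singleton] at hb
        rw [hb]
        have hax : a ∈ xs := (PySem.Set.mem_ofList _ _).mp ha
        have hxx : x ∉ xs := fun hmem => hx ((PySem.Set.mem_ofList _ _).mpr hmem)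
        have h2 : pvIdx (xs ++ [x]) x = xs.length := by
          unfold pvIdx
          rw [PySem.List.index?_append_singleton_self xs x hxx]
          rfl
        rw [pv_idx_append_of_mem xs [x] a hax, h2]
        exact pv_idx_lt_length xs a hax

-- the dict's keys are the distinct values (in reverse-scan first-insertion order)
theorem pv_first_keys (vs : List String) :
    (pvFirst vs).keys = PySem.Set.ofList vs.reverse := by
  unfold pvFirst
  rw [PySem.Dict.keys_foldl_insert_key ((PySem.List.enumerate vs 0).reverse)
      (fun p => p.2) (fun d p => p.1) PySem.Dict.empty]
  simp [PySem.Set.update_nil_left, PySem.List.map_snd_enumerate]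

theorem pv_first_getD (vs : List String) (v : String) (hv : v ∈ vs) :
    (pvFirst vs).getD v 0 = (pvIdx vs v : Int) := by
  obtain ⟨k, hk⟩ := Option.isSome_iff_exists.mp (((PySem.List.index?_isSome_iff _ _).mpr hv))
  have hg : (pvFirst vs).get? v = some ((k : Int)) := by
    unfold pvFirst
    rw [pv_first_get? vs 0 v, hk]
    simp
  have hz : pvIdx vs v = k := by
    unfold pvIdx
    rw [hk]
    rfl
  rw [hz]
  show ((pvFirst vs).get? v).getD 0 = ((k : Nat) : Int)
  rw [hg]
  rfl

theorem pv_ordered_unique (vs : List String) :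
    pvOrderedUnique vs = PySem.List.dedup vs := by
  unfold pvOrderedUnique
  rw [PySem.List.dedup_eq_ofList]
  apply PySem.List.sorted_eq_of_perm_of_pairwise_lt
  · rw [pv_first_keys]
    rw [List.perm_ext_iff_of_nodup (PySem.Set.nodup_ofList _) (PySem.Set.nodup_ofList _)]
    intro a
    simp [PySem.Set.mem_ofList]
  · refine (pv_pairwise vs).imp_of_mem ?_
    intro a b ha hb hab
    rw [pv_first_getD vs a ((PySem.Set.mem_ofList _ _).mp ha),
        pv_first_getD vs b ((PySem.Set.mem_ofList _ _).mp hb)]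
    exact_mod_cast hab

-- ===== VERDICT =====
theorem get_files_and_authors_spec : Claim_equal_get_files_and_authors := by
  intro contributions _
  unfold Spec_get_files_and_authors get_files_and_authors get_files_and_authors_alt
  rw [pv_main_loop]
  simp only [pv_ordered_unique, PySem.List.dedup_eq_ofList, PySem.Set.ofList_eq_foldl]
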